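-- pv_equiv track=rewrite | github.com/jshernandezs/swat-pytools | src/main/swat_utilities/ops_operations.py | new_line
-- ===== SOURCE A (Python) =====
-- def new_line(line, values):
--     line_list = line.split(' ')
--     index = list()
--     c = 0
--     for item in line_list:
--         if item != '':
--             index.append(c)
--             c += 1
--         else:
--             index.append(None)
--
--     for ind, item in enumerate(values):
--         if item == '':
--             mask = [i for i, x in enumerate(index) if x == ind][0]
--             old_format = line_list[mask]
--             new_format = '{:' + old_format.split('.')[0].split(':')[1].split('d')[0] + 's}'
--             line_list[mask] = new_format
--
--     line = ' '.join(line_list)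
--     return line
-- ===== SOURCE B (Python) =====
-- def new_line(line, values):
--     out = []
--     c = 0
--     for tok in line.split(' '):
--         if tok != '':
--             if c < len(values) and values[c] == '':
--                 tok = '{:' + tok.split('.')[0].split(':')[1].split('d')[0] + 's}'
--             c += 1
--         out.append(tok)
--     return ' '.join(out)
-- ===== Notes on version B (the rewrite author's own statement) =====
-- stated objective: simpler
-- what changed: B replaces A's auxiliary index list and the per-empty-value inner linear scan ([i for i,x in enumerate(index) if x==ind][0]) by a single pass over the tokens with a counter of non-empty tokens seen, rewriting a token in place when its value column is empty.
import Mathlib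
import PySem

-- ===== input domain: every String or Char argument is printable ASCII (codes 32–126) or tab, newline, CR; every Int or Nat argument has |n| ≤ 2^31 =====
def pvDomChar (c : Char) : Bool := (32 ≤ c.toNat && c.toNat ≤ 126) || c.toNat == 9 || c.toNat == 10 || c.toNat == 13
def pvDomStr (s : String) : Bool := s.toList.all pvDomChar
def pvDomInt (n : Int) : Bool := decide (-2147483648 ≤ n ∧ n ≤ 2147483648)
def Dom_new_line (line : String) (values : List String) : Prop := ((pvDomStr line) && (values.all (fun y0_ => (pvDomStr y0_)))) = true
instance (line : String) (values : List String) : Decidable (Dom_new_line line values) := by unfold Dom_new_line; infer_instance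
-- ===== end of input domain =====

-- B replaces A's index list + per-value inner scan by a single counter pass over the tokens (simpler, one pass).

-- ===== PORT A =====
-- '{:' + old.split('.')[0].split(':')[1].split('d')[0] + 's}'  (the [1] is a Python IndexError when no ':' — Pre_ excludes that; here getD)
def nlFmt (old : List Char) : List Char :=
  "{:".toList ++
    (PySem.Chars.splitOn
      ((PySem.Chars.splitOn
        ((PySem.Chars.splitOn old ['.']).getD 0 []) [':']).getD 1 []) ['d']).getD 0 []
  ++ "s}".toList

-- index list: running counter at non-empty tokens, None at empty ones
def nlIndex : List (List Char) → Int → List (Option Int)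
  | [], _ => []
  | t :: ts, c => if t ≠ [] then some c :: nlIndex ts (c + 1) else none :: nlIndex ts c

-- [i for i, x in enumerate(index) if x == ind][0]  (head? none = the Python IndexError; Pre_ excludes it)
def nlMask (index : List (Option Int)) (ind : Int) : Option Int :=
  ((((PySem.List.enumerate index 0).filter (fun p => p.2 == some ind)).map Prod.fst)).head?

-- 'for ind, item in enumerate(values): if item == "": …' mutating line_list
def nlLoopA : List String → Int → List (Option Int) → List (List Char) → List (List Char)
  | [], _, _, ll => ll
  | item :: rest, ind, index, ll =>
    if item = "" then
      match nlMask index ind with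
      | some m => nlLoopA rest (ind + 1) index
          (PySem.List.pySetD ll m (nlFmt (PySem.List.pyGetD ll m [])))
      | none => nlLoopA rest (ind + 1) index ll   -- Python raises IndexError here (outside Pre_)
    else nlLoopA rest (ind + 1) index ll

def new_line (line : String) (values : List String) : String :=
  let lineList := PySem.Chars.splitOn line.toList [' ']
  let index := nlIndex lineList 0
  let ll := nlLoopA values 0 index lineList
  String.mk (PySem.Chars.join [' '] ll)

-- ===== PORT B =====
-- single pass: counter c counts non-empty tokens seen so far; rewrite in place when values[c] is ''
def nlLoopB : List (List Char) → List String → Nat → List (List Char)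
  | [], _, _ => []
  | t :: ts, values, c =>
    if t ≠ [] then
      (if c < values.length ∧ values.getD c "x" = "" then nlFmt t else t) :: nlLoopB ts values (c + 1)
    else t :: nlLoopB ts values c

def new_line_alt (line : String) (values : List String) : String :=
  String.mk (PySem.Chars.join [' '] (nlLoopB (PySem.Chars.splitOn line.toList [' ']) values 0))

-- ===== PRECONDITION & SPEC =====
-- the rank-i non-empty tokens of the line, in order
def nlNonempty (line : String) : List (List Char) :=
  (PySem.Chars.splitOn line.toList [' ']).filter (fun t => t ≠ [])

-- Pre_ excludes exactly the inputs where Python A raises IndexError: an empty entry values[i] whose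
-- column (the i-th non-empty token) does not exist, or whose token has no ':' before the first '.'.
def Pre_new_line (line : String) (values : List String) : Prop :=
  ∀ p ∈ values.zipIdx, p.1 = "" →
    p.2 < (nlNonempty line).length ∧
    2 ≤ (PySem.Chars.splitOn ((PySem.Chars.splitOn ((nlNonempty line).getD p.2 []) ['.']).getD 0 []) [':']).length
instance (line : String) (values : List String) : Decidable (Pre_new_line line values) := by
  unfold Pre_new_line; infer_instance

def pvWitness_new_line : String × List String := ("{:8d} {:>10.3f} {:5d}", ["", "7", ""])

def Spec_new_line (line : String) (values : List String) (out : String) : Prop := out = new_line_alt line values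
instance (line : String) (values : List String) (out : String) : Decidable (Spec_new_line line values out) := by unfold Spec_new_line; infer_instance

-- ===== CLAIM (what is proved, stated in full; the proofs are below) =====
def Claim_equal_new_line : Prop := ∀ (line : String) (values : List String), Dom_new_line line values → Pre_new_line line values → Spec_new_line line values (new_line line values)

-- ===== LEMMAS AND PROOFS =====

def nlRank (toks : List (List Char)) (i : Nat) : Nat :=
  ((toks.take i).filter (fun t => t ≠ [])).length
theorem nlRank_zero (toks : List (List Char)) : nlRank toks 0 = 0 := by simp [nlRank]
theorem nlRank_cons_succ (t : List Char) (ts : List (List Char)) (i : Nat) :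
    nlRank (t :: ts) (i + 1) = (if t ≠ [] then 1 else 0) + nlRank ts i := by
  simp [nlRank, List.filter]
  split_ifs with h <;> simp_all <;> omega

theorem nlLoopB_getElem? (toks : List (List Char)) (values : List String) (c : Nat) (i : Nat) :
    (nlLoopB toks values c)[i]? =
      toks[i]?.map (fun t =>
        if t ≠ [] ∧ c + nlRank toks i < values.length ∧ values.getD (c + nlRank toks i) "x" = ""
        then nlFmt t else t) := by
  induction toks generalizing c i with
  | nil => simp [nlLoopB]
  | cons t ts ih =>
    cases i with
    | zero => by_cases h : t = [] <;> simp [nlLoopB, h, nlRank_zero]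
    | succ i =>
      by_cases h : t = [] <;>
        simp [nlLoopB, h, nlRank_cons_succ, ih, Nat.add_comm, Nat.add_assoc, Nat.add_left_comm]


theorem nlMask_shift (xs : List (Option Int)) (ind : Int) (s : Int) :
    ((((PySem.List.enumerate xs (s + 1)).filter (fun p => p.2 == some ind)).map Prod.fst)).head? =
    (((((PySem.List.enumerate xs s).filter (fun p => p.2 == some ind)).map Prod.fst)).head?).map (· + 1) := by
  induction xs generalizing s with
  | nil => simp [PySem.List.enumerate]
  | cons o rest ih =>
    rw [PySem.List.enumerate_cons, PySem.List.enumerate_cons]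
    by_cases h : o = some ind
    · simp [h]
    · have h2 := ih (s + 1)
      simp only [List.filter_cons]
      simp [h, h2]

theorem nlMask_cons (o : Option Int) (rest : List (Option Int)) (ind : Int) :
    nlMask (o :: rest) ind = if o = some ind then some 0 else (nlMask rest ind).map (· + 1) := by
  unfold nlMask
  rw [PySem.List.enumerate_cons]
  by_cases h : o = some ind
  · simp [h]
  · have := nlMask_shift rest ind 0
    simp only [List.filter_cons]
    simp [h]
    simpa using this

theorem nlMask_eq_some (index : List (Option Int)) (ind m : Int)
    (h : nlMask index ind = some m) :
    ∃ j : Nat, m = (j : Int) ∧ index[j]? = some (some ind) := by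
  induction index generalizing m with
  | nil => simp [nlMask, PySem.List.enumerate] at h
  | cons o rest ih =>
    rw [nlMask_cons] at h
    by_cases ho : o = some ind
    · simp [ho] at h
      exact ⟨0, by omega, by simp [ho]⟩
    · simp [ho] at h
      obtain ⟨m', hm', rfl⟩ := h
      obtain ⟨j, rfl, hj⟩ := ih m' hm'
      exact ⟨j + 1, by push_cast; ring, by simpa using hj⟩

theorem nlMask_nlIndex_complete (toks : List (List Char)) (c : Int) (i : Nat)
    (hi : i < toks.length) (hne : toks[i] ≠ []) :
    nlMask (nlIndex toks c) (c + (nlRank toks i : Int)) = some (i : Int) := by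
  induction toks generalizing c i with
  | nil => simp at hi
  | cons t ts ih =>
    cases i with
    | zero =>
      simp only [List.getElem_cons_zero] at hne
      simp [nlIndex, hne, nlMask_cons, nlRank_zero]
    | succ i =>
      simp only [List.getElem_cons_succ] at hne
      have hi' : i < ts.length := by simpa using hi
      by_cases ht : t = []
      · have hrec := ih c i hi' hne
        simp [nlIndex, ht, nlMask_cons, nlRank_cons_succ, hrec]
      · have hrec := ih (c + 1) i hi' hne
        rw [nlRank_cons_succ]
        simp only [nlIndex, ht, ne_eq, not_false_iff, if_true, if_pos (by simp [ht] : ¬t = [] )]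
        rw [nlMask_cons]
        rw [if_neg (by simp; omega)]
        have harg : c + ((1 + nlRank ts i : Nat) : Int) = (c + 1) + (nlRank ts i : Int) := by
          push_cast; ring
        rw [harg, hrec]
        simp

theorem nlIndex_getElem? (toks : List (List Char)) (c : Int) (j : Nat) (hj : j < toks.length) :
    (nlIndex toks c)[j]? = some (if toks[j] ≠ [] then some (c + (nlRank toks j : Int)) else none) := by
  induction toks generalizing c j with
  | nil => simp at hj
  | cons t ts ih =>
    cases j with
    | zero => by_cases h : t = [] <;> simp [nlIndex, h, nlRank_zero]
    | succ j =>
      have hj' : j < ts.length := by simpa using hj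
      by_cases h : t = [] <;>
        simp [nlIndex, h, ih _ _ hj', nlRank_cons_succ] <;> split_ifs <;> push_cast <;> ring_nf <;> simp_all

def nlHit (values : List String) (ind0 : Int) (index : List (Option Int)) (i : Nat) : Bool :=
  match values with
  | [] => false
  | item :: rest => (decide (item = "") && (nlMask index ind0 == some (i : Int))) || nlHit rest (ind0 + 1) index i

theorem nlHit_iff (values : List String) (ind0 : Int) (index : List (Option Int)) (i : Nat) :
    nlHit values ind0 index i = true ↔
      ∃ k : Nat, k < values.length ∧ values.getD k "x" = "" ∧ nlMask index (ind0 + (k : Int)) = some (i : Int) := by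
  induction values generalizing ind0 with
  | nil => simp [nlHit]
  | cons item rest ih =>
    simp only [nlHit, Bool.or_eq_true, Bool.and_eq_true, beq_iff_eq, decide_eq_true_eq, ih]
    constructor
    · rintro (⟨h1, h2⟩ | ⟨k, hk, he, hm⟩)
      · exact ⟨0, by simp, by simpa using h1, by simpa using h2⟩
      · refine ⟨k + 1, by simpa using hk, by simpa using he, ?_⟩
        have : ind0 + ((k : Int) + 1) = ind0 + 1 + (k : Int) := by ring
        push_cast
        rw [this]
        exact hm
    · rintro ⟨k, hk, he, hm⟩
      cases k with
      | zero => exact Or.inl ⟨by simpa using he, by simpa using hm⟩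
      | succ k =>
        refine Or.inr ⟨k, by simpa using hk, by simpa using he, ?_⟩
        have : ind0 + 1 + (k : Int) = ind0 + (((k + 1 : Nat) : Int)) := by push_cast; ring
        rw [this]
        exact hm

theorem nlLoopA_getElem? (values : List String) (ind0 : Int) (index : List (Option Int))
    (ll : List (List Char)) (hl : index.length ≤ ll.length) (i : Nat) :
    (nlLoopA values ind0 index ll)[i]? =
      if nlHit values ind0 index i then ll[i]?.map nlFmt else ll[i]? := by
  induction values generalizing ind0 ll with
  | nil => simp [nlLoopA, nlHit]
  | cons item rest ih =>
    by_cases hitem : item = ""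
    · subst hitem
      cases hm : nlMask index ind0 with
      | none =>
        have hrec := ih (ind0 + 1) ll hl
        simp [nlLoopA, nlHit, hm, hrec]
      | some m =>
        obtain ⟨j, rfl, hj⟩ := nlMask_eq_some index ind0 m hm
        have hjlen : j < index.length := by
          by_contra hc
          rw [List.getElem?_eq_none_iff.mpr (by omega)] at hj
          simp at hj
        have hjll : j < ll.length := lt_of_lt_of_le hjlen hl
        have hrec := ih (ind0 + 1) (ll.set j (nlFmt (ll.getD j []))) (by simpa using hl)
        have hstep : nlLoopA ("" :: rest) ind0 index ll
            = nlLoopA rest (ind0 + 1) index (ll.set j (nlFmt (ll.getD j []))) := by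
          simp [nlLoopA, hm, PySem.List.pySetD_natCast, PySem.List.pyGetD_natCast]
        rw [hstep, hrec]
        by_cases hij : i = j
        · subst hij
          have hnorest : nlHit rest (ind0 + 1) index i = false := by
            by_contra hc
            rw [Bool.not_eq_false, nlHit_iff] at hc
            obtain ⟨k, _, _, hmk⟩ := hc
            obtain ⟨j2, hj2, hj2e⟩ := nlMask_eq_some index _ _ hmk
            have : j2 = i := by exact_mod_cast hj2.symm
            subst this
            rw [hj] at hj2e
            have : ind0 = ind0 + 1 + (k : Int) := by
              have := Option.some.inj hj2e
              have := Option.some.inj this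
              omega
            omega
          have hcond : nlHit ("" :: rest) ind0 index i = true := by
            simp [nlHit, hm]
          rw [hnorest, hcond]
          simp [List.getElem?_set, hjll, List.getD_eq_getElem?_getD, List.getElem?_eq_getElem hjll]
        · have hset : (ll.set j (nlFmt (ll.getD j [])))[i]? = ll[i]? := by
            rw [List.getElem?_set, if_neg (fun h : j = i => hij h.symm)]
          rw [hset]
          have hmaskne : (nlMask index ind0 == some (i : Int)) = false := by
            simp [hm]; omega
          simp [nlHit, hmaskne]
    · have hrec := ih (ind0 + 1) ll hl
      simp [nlLoopA, nlHit, hitem, hrec]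

theorem nlIndex_length (toks : List (List Char)) (c : Int) :
    (nlIndex toks c).length = toks.length := by
  induction toks generalizing c with
  | nil => rfl
  | cons t ts ih => by_cases h : t = [] <;> simp [nlIndex, h, ih]

theorem nlHit_nlIndex (toks : List (List Char)) (values : List String) (i : Nat) :
    nlHit values 0 (nlIndex toks 0) i = true ↔
      ∃ hi : i < toks.length,
        toks[i] ≠ [] ∧ nlRank toks i < values.length ∧ values.getD (nlRank toks i) "x" = "" := by
  constructor
  · intro h
    obtain ⟨k, hk, he, hm⟩ := (nlHit_iff values 0 (nlIndex toks 0) i).mp h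
    obtain ⟨j, hji, hj⟩ := nlMask_eq_some _ _ _ hm
    have hij : j = i := by exact_mod_cast hji.symm
    subst hij
    have hjlen : j < toks.length := by
      by_contra hc
      rw [List.getElem?_eq_none_iff.mpr (by rw [nlIndex_length]; omega)] at hj
      simp at hj
    rw [nlIndex_getElem? toks 0 j hjlen] at hj
    by_cases hne : toks[j] ≠ []
    · rw [if_pos hne] at hj
      have : (nlRank toks j : Int) = (k : Int) := by
        have := Option.some.inj (Option.some.inj hj)
        omega
      have hrk : nlRank toks j = k := by exact_mod_cast this
      exact ⟨hjlen, hne, by omega, by rw [hrk]; exact he⟩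
    · rw [if_neg hne] at hj
      simp at hj
  · rintro ⟨hi, hne, hlt, he⟩
    apply (nlHit_iff values 0 (nlIndex toks 0) i).mpr
    exact ⟨nlRank toks i, hlt, he, nlMask_nlIndex_complete toks 0 i hi hne⟩

theorem nl_main (toks : List (List Char)) (values : List String) :
    nlLoopA values 0 (nlIndex toks 0) toks = nlLoopB toks values 0 := by
  apply List.ext_getElem?
  intro i
  rw [nlLoopA_getElem? _ _ _ _ (by rw [nlIndex_length]), nlLoopB_getElem?]
  by_cases hhit : nlHit values 0 (nlIndex toks 0) i = true
  · rw [if_pos hhit]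
    obtain ⟨hi, hne, hlt, he⟩ := (nlHit_nlIndex toks values i).mp hhit
    rw [List.getElem?_eq_getElem hi]
    have he' : values[nlRank toks i] = "" := by
      rwa [List.getD_eq_getElem values "x" hlt] at he
    simp [hne, hlt, he']
  · rw [if_neg hhit]
    cases hx : toks[i]? with
    | none => simp
    | some t =>
      have hi : i < toks.length := by
        by_contra hc
        rw [List.getElem?_eq_none_iff.mpr (by omega)] at hx
        simp at hx
      have ht : t = toks[i] := by
        rw [List.getElem?_eq_getElem hi] at hx
        exact (Option.some.inj hx).symm
      simp only [Option.map_some]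
      have hcond : ¬(t ≠ [] ∧ 0 + nlRank toks i < values.length ∧ values.getD (0 + nlRank toks i) "x" = "") := by
        rintro ⟨h1, h2, h3⟩
        apply hhit
        rw [nlHit_nlIndex]
        exact ⟨hi, by rwa [ht] at h1, by simpa using h2, by simpa using h3⟩
      rw [if_neg hcond]

-- ===== VERDICT (by name: the statement is the Claim_ definition above) =====
theorem new_line_spec : Claim_equal_new_line := by
  intro line values _ _
  show new_line line values = new_line_alt line values
  simp only [new_line, new_line_alt]
  rw [nl_main]
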